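-- pv_equiv track=rewrite | github.com/pypi-data/pypi-mirror-379 | packages/upas/upas-1.0.0-py3-none-any.whl/upas/analysis/pattern.py | _find_common_suffix_strict
-- ===== SOURCE A (Python) =====
-- from typing import List, Dict, Any
--
-- def _find_common_suffix_strict(payloads: List[str]) -> str:
--     """Find common suffix using strict iterative algorithm."""
--     if not payloads or len(payloads) < 2:
--         return ""
--
--     min_len = min(len(p) for p in payloads if p)
--     if min_len < 4:  # Minimum 2 bytes = 4 hex chars
--         return ""
--
--     # Start with 2 bytes (4 hex chars) from first payload
--     pattern_len = 4
--
--     while pattern_len <= min_len: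
--         # Get pattern from end of first payload
--         pattern = payloads[0][-pattern_len:]
--
--         # Check if ALL payloads have this exact suffix
--         all_match = all(p.endswith(pattern) for p in payloads)
--
--         if all_match:
--             # All match, try with one more byte (2 hex chars)
--             pattern_len += 2
--             # Safety limit: don't go beyond 24 hex chars (12 bytes)
--             if pattern_len > 24:
--                 break
--         else:
--             # Not all match
--             if pattern_len == 4:
--                 # We're still at 2 bytes and it doesn't work
--                 return ""  # No suffix
--             else:
--                 # Return pattern minus 1 byte (previous working pattern)
--                 return payloads[0][-(pattern_len - 2) :]
--
--     # If we exit the loop, return the last working pattern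
--     return payloads[0][-(pattern_len - 2) :] if pattern_len > 4 else ""
-- ===== SOURCE B (Python) =====
-- def _find_common_suffix_strict(payloads):
--     """Only the last 24 chars of each payload can matter (the cap), so take
--     p[-24:], reverse, and compute the common-prefix length in one pass;
--     round down to even and slice."""
--     if len(payloads) < 2:
--         return ""
--     s = _common_prefix_len([p[-24:][::-1] for p in payloads])
--     L = s & ~1
--     return payloads[0][-L:] if L >= 4 else ""
--
--
-- def _common_prefix_len(xs):
--     """Length of the longest common prefix of a list of strings."""
--     n = 0
--     for chars in zip(*xs):
--         if any(c != chars[0] for c in chars):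
--             break
--         n += 1
--     return n
-- ===== Notes on version B (the rewrite author's own statement) =====
-- stated objective: alternative
-- what changed: Instead of A's loop of growing endswith probes (pattern_len = 4,6,8,... each rescanning all payloads), B truncates each payload to its last 24 chars (the cap makes anything longer irrelevant), reverses, computes the common-prefix length in one zip scan, rounds down to even and slices once.
import Mathlib
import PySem

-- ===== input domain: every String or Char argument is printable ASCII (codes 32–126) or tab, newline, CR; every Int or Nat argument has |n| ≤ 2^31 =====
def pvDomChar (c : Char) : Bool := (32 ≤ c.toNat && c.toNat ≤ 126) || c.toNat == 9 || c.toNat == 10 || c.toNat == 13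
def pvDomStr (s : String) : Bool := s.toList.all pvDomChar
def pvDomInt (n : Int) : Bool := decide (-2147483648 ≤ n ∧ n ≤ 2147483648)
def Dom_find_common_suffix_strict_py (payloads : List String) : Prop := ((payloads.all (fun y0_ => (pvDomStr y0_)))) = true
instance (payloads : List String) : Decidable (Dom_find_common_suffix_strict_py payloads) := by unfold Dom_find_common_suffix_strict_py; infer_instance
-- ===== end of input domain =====

-- B truncates each payload to its last 24 chars (the cap) and takes the common-prefix
-- length of the reversed truncations in one scan, instead of A's growing endswith probes;
-- equal return values are proved on Pre_ (A raises ValueError when all payloads are empty).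


-- ===== PORT A =====

-- s[-k:] (every use has k ≥ 1)
def pvLastN (s : String) (k : Nat) : String := PySem.Str.slice s (some (-(k : Int))) none

-- the while-loop of A, state = pattern_len; 'pattern' is payloads[0][-pattern_len:]
def pvALoop (payloads : List String) (first : String) (min_len pattern_len : Nat) : String :=
  if h : pattern_len ≤ min_len then
    if payloads.all (fun p => PySem.Str.endswith p (pvLastN first pattern_len)) then
      if pattern_len + 2 > 24 then
        -- pattern_len += 2 then break; the final return fires with pattern_len+2 > 4
        pvLastN first ((pattern_len + 2) - 2)
      else
        pvALoop payloads first min_len (pattern_len + 2)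
    else
      if pattern_len == 4 then "" else pvLastN first (pattern_len - 2)
  else
    if 4 < pattern_len then pvLastN first (pattern_len - 2) else ""
termination_by min_len + 1 - pattern_len
decreasing_by omega

def find_common_suffix_strict_py (payloads : List String) : String :=
  if payloads.length < 2 then ""                        -- 'not payloads or len(payloads) < 2'
  else
    match PySem.List.min? ((payloads.filter (fun p => p ≠ "")).map (fun p => p.toList.length)) (fun x => x) with
    | none => ""                                        -- min() of empty sequence: ValueError, excluded by Pre_
    | some min_len =>
      if min_len < 4 then ""
      else pvALoop payloads (payloads.headD "") min_len 4

-- ===== PORT B =====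

-- length of the longest common prefix of a list of char lists (Source B's zip loop)
def pvCommonPrefixLen : List (List Char) → Nat
  | [] => 0                                             -- zip(*[]) is empty
  | [] :: _ => 0                                        -- zip stops at an exhausted string
  | (c :: cs) :: rest =>
      if rest.all (fun l => l.head? == some c) then
        1 + pvCommonPrefixLen (cs :: rest.map List.tail)
      else 0
termination_by xs => (xs.headD []).length
decreasing_by simp

def find_common_suffix_strict_py_alt (payloads : List String) : String :=
  if payloads.length < 2 then ""
  else
    -- p[-24:][::-1] = last 24 code points (clamped drop), reversed
    let s := pvCommonPrefixLen (payloads.map (fun p => (p.toList.drop (p.toList.length - 24)).reverse))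
    let L := 2 * (s / 2)                                -- s & ~1
    if 4 ≤ L then
      -- payloads[0][-L:] with L ≥ 4
      String.ofList ((payloads.headD "").toList.drop ((payloads.headD "").toList.length - L))
    else ""

-- ===== PRECONDITION & SPEC =====

-- Pre_ excludes only the inputs where A raises ValueError: two or more payloads, all empty
def Pre_find_common_suffix_strict_py (payloads : List String) : Prop :=
  payloads.length < 2 ∨ ∃ p ∈ payloads, p ≠ ""
instance (payloads : List String) : Decidable (Pre_find_common_suffix_strict_py payloads) := by
  unfold Pre_find_common_suffix_strict_py; infer_instance

def pvWitness_find_common_suffix_strict_py : List String := ["aabcd", "zabcd"]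

def Spec_find_common_suffix_strict_py (payloads : List String) (out : String) : Prop :=
  out = find_common_suffix_strict_py_alt payloads
instance (payloads : List String) (out : String) : Decidable (Spec_find_common_suffix_strict_py payloads out) := by
  unfold Spec_find_common_suffix_strict_py; infer_instance

-- ===== CLAIM (what is proved, stated in full; the proofs are below) =====
def Claim_equal_find_common_suffix_strict_py : Prop :=
  ∀ (payloads : List String), Dom_find_common_suffix_strict_py payloads →
    Pre_find_common_suffix_strict_py payloads →
    Spec_find_common_suffix_strict_py payloads (find_common_suffix_strict_py payloads)

-- ===== LEMMAS AND PROOFS =====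

-- the reversed 24-truncation is 'take 24' of the reversed list
lemma pv_trunc_eq (p : String) :
    (p.toList.drop (p.toList.length - 24)).reverse = p.toList.reverse.take 24 := by
  rw [List.reverse_drop]
  by_cases h : p.toList.length ≤ 24
  · have h1 : p.toList.length - (p.toList.length - 24) = p.toList.length := by omega
    rw [h1, List.take_of_length_le (by rw [List.length_reverse]), List.take_of_length_le (by rw [List.length_reverse]; exact h)]
  · have h1 : p.toList.length - (p.toList.length - 24) = 24 := by omega
    rw [h1]

-- characterisation of the common-prefix length
lemma pv_cpl_ge_iff (k : Nat) : ∀ (l : List Char) (ls : List (List Char)),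
    k ≤ pvCommonPrefixLen (l :: ls) ↔ k ≤ l.length ∧ ∀ m ∈ ls, m.take k = l.take k := by
  induction k with
  | zero => intro l ls; simp
  | succ k IH =>
    intro l ls
    cases l with
    | nil => simp [pvCommonPrefixLen]
    | cons c cs =>
      rw [pvCommonPrefixLen]
      by_cases h : ls.all (fun l => l.head? == some c)
      · rw [if_pos h]
        have hmem : ∀ m ∈ ls, ∃ m', m = c :: m' := by
          intro m hm
          have := (List.all_eq_true.mp h) m hm
          cases m with
          | nil => simp at this
          | cons d ds => simp at this; exact ⟨ds, by rw [this]⟩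
        constructor
        · intro hle
          have hk : k ≤ pvCommonPrefixLen (cs :: ls.map List.tail) := by omega
          obtain ⟨h1, h2⟩ := (IH cs (ls.map List.tail)).mp hk
          refine ⟨by simp only [List.length_cons]; omega, ?_⟩
          intro m hm
          obtain ⟨m', rfl⟩ := hmem m hm
          have ht : m'.take k = cs.take k :=
            h2 m' (by have := List.mem_map_of_mem (f := List.tail) hm; simpa using this)
          simp only [List.take_succ_cons]
          rw [ht]
        · rintro ⟨h1, h2⟩
          have hk : k ≤ pvCommonPrefixLen (cs :: ls.map List.tail) := by
            refine (IH cs (ls.map List.tail)).mpr ⟨by simp only [List.length_cons] at h1; omega, ?_⟩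
            intro m hm
            obtain ⟨m0, hm0, rfl⟩ := List.mem_map.mp hm
            obtain ⟨m', rfl⟩ := hmem m0 hm0
            have := h2 (c :: m') hm0
            simp only [List.take_succ_cons, List.cons.injEq] at this
            simpa using this.2
          omega
      · rw [if_neg h]
        constructor
        · intro hle; omega
        · rintro ⟨h1, h2⟩
          exfalso
          apply h
          rw [List.all_eq_true]
          intro m hm
          have hmk := h2 m hm
          cases m with
          | nil =>
            exfalso
            have := congrArg List.length hmk
            simp only [List.take_nil, List.length_nil, List.length_take, List.length_cons] at this
            omega
          | cons d ds =>
            simp only [List.take_succ_cons, List.cons.injEq] at hmk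
            simp [hmk.1]

-- lengths from the characterisation
lemma pv_cpl_le (l : List Char) (ls : List (List Char)) :
    pvCommonPrefixLen (l :: ls) ≤ l.length ∧
    ∀ m ∈ ls, pvCommonPrefixLen (l :: ls) ≤ m.length := by
  obtain ⟨h1, h2⟩ := (pv_cpl_ge_iff (pvCommonPrefixLen (l :: ls)) l ls).mp (le_refl _)
  refine ⟨h1, fun m hm => ?_⟩
  have := congrArg List.length (h2 m hm)
  simp only [List.length_take] at this
  omega

lemma pvLastN_toList (s : String) (k : Nat) (hk : 0 < k) :
    (pvLastN s k).toList = s.toList.drop (s.toList.length - k) := by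
  simp [pvLastN, PySem.List.slice_from_neg_natCast _ _ hk]

lemma pvLastN_empty (k : Nat) : pvLastN "" k = "" := by
  apply String.toList_inj.mp
  simp [pvLastN, PySem.List.slice_some_none]

lemma pvLastN_eq_ofList (s : String) (k : Nat) (hk : 0 < k) :
    pvLastN s k = String.ofList (s.toList.drop (s.toList.length - k)) := by
  apply String.toList_inj.mp
  simp [pvLastN_toList s k hk]

-- p.endswith(first[-k:]) is equality of the reversed k-prefixes
lemma pv_endswith_lastN_iff (p p0 : String) (k : Nat) (hk : 0 < k) (hk0 : k ≤ p0.toList.length) :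
    (PySem.Str.endswith p (pvLastN p0 k) = true)
      ↔ p.toList.reverse.take k = p0.toList.reverse.take k := by
  have hpat : (pvLastN p0 k).toList = p0.toList.drop (p0.toList.length - k) :=
    pvLastN_toList p0 k hk
  have hrev : (pvLastN p0 k).toList.reverse = p0.toList.reverse.take k := by
    rw [hpat, List.reverse_drop]
    congr 1
    omega
  have hlen : (pvLastN p0 k).toList.reverse.length = k := by
    rw [hrev, List.length_take, List.length_reverse]
    omega
  constructor
  · intro h
    have hsuf : (pvLastN p0 k).toList <:+ p.toList := by
      have := PySem.Chars.endswith_iff p.toList (pvLastN p0 k).toList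
      simp only [PySem.Str.endswith_eq] at h
      exact this.mp h
    have hpre := List.prefix_iff_eq_take.mp (List.reverse_prefix.mpr hsuf)
    rw [hlen] at hpre
    rw [← hrev, hpre]
  · intro h
    have hpre : (pvLastN p0 k).toList.reverse <+: p.toList.reverse := by
      rw [List.prefix_iff_eq_take, hlen, hrev, h]
    have hsuf : (pvLastN p0 k).toList <:+ p.toList := List.reverse_prefix.mp hpre
    simp only [PySem.Str.endswith_eq]
    exact (PySem.Chars.endswith_iff p.toList (pvLastN p0 k).toList).mpr hsuf

lemma pv_take_trunc (p : String) (k : Nat) (hk24 : k ≤ 24) :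
    ((p.toList.drop (p.toList.length - 24)).reverse).take k = p.toList.reverse.take k := by
  rw [pv_trunc_eq, List.take_take]
  congr 1
  omega

-- A's all(endswith) test for length k is 'k ≤ common prefix length of reversed truncations'
lemma pv_all_endswith_iff (p0 : String) (ps : List String) (k : Nat)
    (hk : 0 < k) (hk24 : k ≤ 24) (hk0 : k ≤ p0.toList.length) :
    ((p0 :: ps).all (fun p => PySem.Str.endswith p (pvLastN p0 k)) = true)
      ↔ k ≤ pvCommonPrefixLen ((p0.toList.drop (p0.toList.length - 24)).reverse
            :: ps.map (fun p => (p.toList.drop (p.toList.length - 24)).reverse)) := by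
  rw [pv_cpl_ge_iff, List.all_eq_true]
  constructor
  · intro h
    refine ⟨?_, ?_⟩
    · rw [pv_trunc_eq]
      simp only [List.length_take, List.length_reverse]
      omega
    · intro m hm
      obtain ⟨p, hp, rfl⟩ := List.mem_map.mp hm
      rw [pv_take_trunc p k hk24, pv_take_trunc p0 k hk24]
      exact (pv_endswith_lastN_iff p p0 k hk hk0).mp (h p (List.mem_cons_of_mem _ hp))
  · rintro ⟨h1, h2⟩
    intro p hp
    rcases List.mem_cons.mp hp with rfl | hp'
    · exact (pv_endswith_lastN_iff p p k hk hk0).mpr rfl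
    · refine (pv_endswith_lastN_iff p p0 k hk hk0).mpr ?_
      have := h2 _ (List.mem_map_of_mem hp')
      rwa [pv_take_trunc p k hk24, pv_take_trunc p0 k hk24] at this

-- with an empty first payload every pattern is empty and every return slices ""
lemma pvALoop_empty (payloads : List String) (min_len : Nat) :
    ∀ n t, min_len + 1 - t = n → pvALoop payloads "" min_len t = "" := by
  intro n
  induction n using Nat.strong_induction_on with
  | _ n IH =>
    intro t hn
    rw [pvALoop]
    by_cases h1 : t ≤ min_len
    · rw [dif_pos h1]
      split_ifs with h2 h3 h4
      · exact pvLastN_empty _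
      · exact IH (min_len + 1 - (t + 2)) (by omega) (t + 2) rfl
      · rfl
      · exact pvLastN_empty _
    · rw [dif_neg h1]
      split_ifs with h2
      · exact pvLastN_empty _
      · rfl

-- the loop computes the capped, even-rounded common suffix
lemma pvALoop_eq (p0 : String) (ps : List String) (min_len S : Nat)
    (hS : S = pvCommonPrefixLen ((p0.toList.drop (p0.toList.length - 24)).reverse
            :: ps.map (fun p => (p.toList.drop (p.toList.length - 24)).reverse)))
    (hS24 : S ≤ 24) (hSml : S ≤ min_len) (hml : 4 ≤ min_len) (hml0 : min_len ≤ p0.toList.length) :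
    ∀ n t, 26 - t = n → t % 2 = 0 → 4 ≤ t → t ≤ 24 → (t = 4 ∨ t ≤ S + 2) →
      pvALoop (p0 :: ps) p0 min_len t =
        (if 4 ≤ 2 * (S / 2) then pvLastN p0 (2 * (S / 2)) else "") := by
  intro n
  induction n using Nat.strong_induction_on with
  | _ n IH =>
    intro t hn h2 h4 h24 hinv
    rw [pvALoop]
    by_cases h1 : t ≤ min_len
    · rw [dif_pos h1]
      have hall := pv_all_endswith_iff p0 ps t (by omega) h24 (by omega)
      rw [← hS] at hall
      by_cases hm : t ≤ S
      · rw [if_pos (hall.mpr hm)]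
        by_cases hb : t + 2 > 24
        · rw [if_pos hb]
          have ht24 : t = 24 := by omega
          have hS' : S = 24 := by omega
          rw [hS', ht24]
          norm_num
        · rw [if_neg hb]
          exact IH (26 - (t + 2)) (by omega) (t + 2) rfl (by omega) (by omega) (by omega) (Or.inr (by omega))
      · have hfalse : ((p0 :: ps).all fun p => PySem.Str.endswith p (pvLastN p0 t)) = false := by
          cases hcase : ((p0 :: ps).all fun p => PySem.Str.endswith p (pvLastN p0 t)) with
          | false => rfl
          | true => exact absurd (hall.mp hcase) hm
        rw [hfalse, if_neg (by simp)]
        by_cases ht4 : t = 4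
        · rw [if_pos (by simp [ht4])]
          rw [if_neg (by omega)]
        · rw [if_neg (by simp [ht4])]
          have hinv' : t ≤ S + 2 := by
            rcases hinv with rfl | h
            · exact absurd rfl ht4
            · exact h
          have hSd : 2 * (S / 2) = t - 2 := by omega
          rw [hSd, if_pos (by omega)]
    · rw [dif_neg h1]
      have hinv' : t ≤ S + 2 := by
        rcases hinv with rfl | h
        · omega
        · exact h
      have hgt : 4 < t := by omega
      rw [if_pos hgt]
      have hSd : 2 * (S / 2) = t - 2 := by omega
      rw [hSd, if_pos (by omega)]

-- ===== VERDICT (by name: the statement is the Claim_ definition above) =====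
theorem find_common_suffix_strict_py_spec : Claim_equal_find_common_suffix_strict_py := by
  intro payloads hdom hpre
  unfold Spec_find_common_suffix_strict_py
  by_cases hlen : payloads.length < 2
  · rw [find_common_suffix_strict_py, if_pos hlen,
        find_common_suffix_strict_py_alt, if_pos hlen]
  · obtain ⟨p0, ps, rfl⟩ : ∃ p0 ps, payloads = p0 :: ps := by
      cases payloads with
      | nil => simp at hlen
      | cons a l => exact ⟨a, l, rfl⟩
    have hex : ∃ p ∈ p0 :: ps, p ≠ "" := by
      rcases hpre with h | h
      · exact absurd h hlen
      · exact h
    have hfil : ((p0 :: ps).filter (fun p => p ≠ "")) ≠ [] := by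
      obtain ⟨p, hp, hne⟩ := hex
      exact List.ne_nil_of_mem (List.mem_filter.mpr ⟨hp, by simpa using hne⟩)
    obtain ⟨m, hmin⟩ : ∃ m, PySem.List.min? (((p0 :: ps).filter (fun p => p ≠ "")).map (fun p => p.toList.length)) (fun x => x) = some m := by
      cases hc : PySem.List.min? (((p0 :: ps).filter (fun p => p ≠ "")).map (fun p => p.toList.length)) (fun x => x) with
      | none =>
        exfalso
        have := (PySem.List.min?_eq_none_iff _ _).mp hc
        simp only [List.map_eq_nil_iff] at this
        exact hfil this
      | some v => exact ⟨v, rfl⟩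
    have hmmin : ∀ p ∈ p0 :: ps, p ≠ "" → m ≤ p.toList.length := by
      intro p hp hne
      exact PySem.List.min?_isMin hmin _ (List.mem_map_of_mem (List.mem_filter.mpr ⟨hp, by simpa using hne⟩))
    obtain ⟨q, hq, hqm⟩ : ∃ q ∈ (p0 :: ps).filter (fun p => p ≠ ""), q.toList.length = m := by
      have := PySem.List.min?_mem hmin
      obtain ⟨q, hq, hqm⟩ := List.mem_map.mp this
      exact ⟨q, hq, hqm⟩
    rw [find_common_suffix_strict_py, if_neg hlen]
    simp only [hmin]
    rw [find_common_suffix_strict_py_alt, if_neg hlen]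
    simp only [List.map_cons, List.headD_cons]
    set S := pvCommonPrefixLen ((p0.toList.drop (p0.toList.length - 24)).reverse
            :: ps.map (fun p => (p.toList.drop (p.toList.length - 24)).reverse)) with hS
    obtain ⟨hb1, hb2⟩ := pv_cpl_le ((p0.toList.drop (p0.toList.length - 24)).reverse)
            (ps.map (fun p => (p.toList.drop (p.toList.length - 24)).reverse))
    rw [← hS] at hb1 hb2
    have hlen0 : ((p0.toList.drop (p0.toList.length - 24)).reverse).length = min 24 p0.toList.length := by
      rw [pv_trunc_eq]; simp
    have hS24 : S ≤ 24 := by rw [hlen0] at hb1; omega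
    have hSlen : ∀ p ∈ p0 :: ps, S ≤ p.toList.length := by
      intro p hp
      rcases List.mem_cons.mp hp with rfl | hp'
      · rw [hlen0] at hb1; omega
      · have := hb2 _ (List.mem_map_of_mem hp')
        have hlp : ((p.toList.drop (p.toList.length - 24)).reverse).length = min 24 p.toList.length := by
          rw [pv_trunc_eq]; simp
        rw [hlp] at this
        omega
    have hSm : S ≤ m := by
      have := hSlen q (List.mem_of_mem_filter hq)
      omega
    by_cases hm4 : m < 4
    · rw [if_pos hm4]
      rw [if_neg (by omega)]
    · rw [if_neg hm4]
      by_cases hp0 : p0 = ""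
      · subst hp0
        rw [pvALoop_empty (("" : String) :: ps) m (m + 1 - 4) 4 rfl]
        have hS0 : S = 0 := by
          rw [hS]
          simp [pvCommonPrefixLen]
        rw [if_neg (by omega)]
      · have hml0 : m ≤ p0.toList.length := hmmin p0 List.mem_cons_self hp0
        rw [pvALoop_eq p0 ps m S hS hS24 hSm (by omega) hml0 22 4 rfl (by omega) (by omega) (by omega) (Or.inl rfl)]
        by_cases hL : 4 ≤ 2 * (S / 2)
        · rw [if_pos hL, if_pos hL]
          exact pvLastN_eq_ofList p0 _ (by omega)
        · rw [if_neg hL, if_neg hL]
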